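-- pv_equiv track=rewrite | github.com/unagpal/ChasinResearch2018 | shuffle_substitute.py | sevenmertorow
-- ===== SOURCE A (Python) =====
-- def sevenmertorow (sevenmer):
--     bases = ['A', 'C', 'G', 'T']
--     num_str = ''
--     for i in sevenmer:
--         for j in range(len(bases)):
--             if (i == bases[j]):
--                 num_str = num_str + str(j)
--     num_str = str(num_str)
--     ans =  int(num_str[0])* (4**6) + int(num_str[1]) * (4**5) + int(num_str[2])* (4**4) + int(num_str[3]) * (4**3) + int(num_str[4]) * (4**2) + int(num_str[5])*4 + int(num_str[6])
--     return ans;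
-- ===== SOURCE B (Python) =====
-- def _val(q, k):
--     # value of the first k digits of q, consumed recursively from the back
--     if k == 0:
--         return 0
--     return _val(q, k - 1) * 4 + int(q[k - 1])
--
-- def sevenmertorow(sevenmer):
--     kept = ''.join(c for c in sevenmer if c in 'ACGT')
--     for base, digit in zip('ACGT', '0123'):
--         kept = kept.replace(base, digit)
--     return _val(kept, 7)
-- ===== Notes on version B (the rewrite author's own statement) =====
-- stated objective: alternative
-- what changed: Replaces A's nested per-character scan over the base table and explicit 4**6..4**0 polynomial by staged passes: filter the valid bases, textually replace each base letter by its digit via str.replace, then evaluate the quaternary numeral string by back-to-front structural recursion.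
import Mathlib
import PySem

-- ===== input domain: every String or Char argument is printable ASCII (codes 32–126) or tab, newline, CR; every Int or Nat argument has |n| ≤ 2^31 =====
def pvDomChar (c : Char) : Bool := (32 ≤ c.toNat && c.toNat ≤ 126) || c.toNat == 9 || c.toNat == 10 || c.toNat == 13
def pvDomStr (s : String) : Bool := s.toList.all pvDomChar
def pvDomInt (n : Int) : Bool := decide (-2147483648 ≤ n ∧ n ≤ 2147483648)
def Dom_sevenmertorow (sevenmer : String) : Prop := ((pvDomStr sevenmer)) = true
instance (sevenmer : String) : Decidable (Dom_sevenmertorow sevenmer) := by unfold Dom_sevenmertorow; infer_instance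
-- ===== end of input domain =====

-- B replaces A's nested per-character scan and explicit 4^6..4^0 polynomial by staged
-- passes — filter, textual base→digit replacement, then a back-to-front recursive
-- evaluation of the quaternary numeral (objective: alternative).

-- ===== PORT A =====
def sevenmertorow (sevenmer : String) : Int :=
  let bases : List Char := ['A', 'C', 'G', 'T']
  let num_str : List Char :=
    sevenmer.toList.foldl (fun ns i =>
      (PySem.List.pyRange 0 (PySem.List.len bases) 1).foldl (fun ns2 j =>
        if PySem.List.pyGet? bases j = some i then ns2 ++ PySem.Int.toChars j else ns2) ns) []
  -- int(num_str[k]) : pyGetD / .getD are total stand-ins, used only under Pre_ (7 digits present)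
  (PySem.Int.ofChars? [PySem.List.pyGetD num_str 0 ' ']).getD 0 * 4 ^ 6 +
  (PySem.Int.ofChars? [PySem.List.pyGetD num_str 1 ' ']).getD 0 * 4 ^ 5 +
  (PySem.Int.ofChars? [PySem.List.pyGetD num_str 2 ' ']).getD 0 * 4 ^ 4 +
  (PySem.Int.ofChars? [PySem.List.pyGetD num_str 3 ' ']).getD 0 * 4 ^ 3 +
  (PySem.Int.ofChars? [PySem.List.pyGetD num_str 4 ' ']).getD 0 * 4 ^ 2 +
  (PySem.Int.ofChars? [PySem.List.pyGetD num_str 5 ' ']).getD 0 * 4 +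
  (PySem.Int.ofChars? [PySem.List.pyGetD num_str 6 ' ']).getD 0

-- ===== PORT B =====
/-- `_val(q, k)`: base-4 value of the first `k` digits of `q`, consumed recursively
from the back. `int(q[k-1])` : `.getD 0` is a total stand-in, unreachable under Pre_
(`q` then has at least 7 digit characters). The `k < 0` branch is a totality guard only
(Python's recursion is never entered with a negative `k`). -/
def sevenmertorow_val (q : List Char) (k : Int) : Int :=
  if k = 0 then 0
  else if k < 0 then 0
  else
    sevenmertorow_val q (k - 1) * 4 +
      (PySem.Int.ofChars? (PySem.List.pyGet? q (k - 1)).toList).getD 0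
termination_by k.toNat
decreasing_by omega

def sevenmertorow_alt (sevenmer : String) : Int :=
  let kept : List Char :=
    sevenmer.toList.filter (fun c => PySem.Chars.isIn [c] ['A', 'C', 'G', 'T'])
  let kept2 : List Char :=
    (List.zip ['A', 'C', 'G', 'T'] ['0', '1', '2', '3']).foldl
      (fun k bd => PySem.Chars.replace k [bd.1] [bd.2]) kept
  sevenmertorow_val kept2 7

-- ===== PRECONDITION & SPEC =====
-- Pre_ excludes inputs with fewer than 7 A/C/G/T characters, on which Python A raises IndexError.
def Pre_sevenmertorow (sevenmer : String) : Prop :=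
  7 ≤ sevenmer.toList.countP (fun c => c == 'A' || c == 'C' || c == 'G' || c == 'T')
instance (sevenmer : String) : Decidable (Pre_sevenmertorow sevenmer) := by
  unfold Pre_sevenmertorow; infer_instance
def pvWitness_sevenmertorow : String := "ACGTACG"

def Spec_sevenmertorow (sevenmer : String) (out : Int) : Prop := out = sevenmertorow_alt sevenmer
instance (sevenmer : String) (out : Int) : Decidable (Spec_sevenmertorow sevenmer out) := by
  unfold Spec_sevenmertorow; infer_instance

-- ===== CLAIM (what is proved, stated in full; the proofs are below) =====
def Claim_equal_sevenmertorow : Prop := ∀ (sevenmer : String), Dom_sevenmertorow sevenmer → Pre_sevenmertorow sevenmer → Spec_sevenmertorow sevenmer (sevenmertorow sevenmer)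

-- ===== LEMMAS AND PROOFS =====

/-- digit value of a base character, `none` for anything else -/
def pvG (c : Char) : Option Int :=
  if c = 'A' then some 0 else if c = 'C' then some 1
  else if c = 'G' then some 2 else if c = 'T' then some 3 else none

/-- digit character for a digit value 0..3 -/
def pvDC (d : Int) : Char :=
  if d = 0 then '0' else if d = 1 then '1' else if d = 2 then '2' else '3'

-- ---- A-side: num_str = map pvDC (filterMap pvG l) ----

theorem pvInner_fold (c : Char) (ns : List Char) :
    (PySem.List.pyRange 0 (PySem.List.len ['A','C','G','T']) 1).foldl (fun ns2 j =>
      if PySem.List.pyGet? ['A','C','G','T'] j = some c then ns2 ++ PySem.Int.toChars j else ns2) ns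
    = ns ++ ((pvG c).map pvDC).toList := by
  have hr : PySem.List.pyRange 0 (PySem.List.len ['A','C','G','T']) 1 = [0,1,2,3] := by decide
  rw [hr]
  simp only [List.foldl,
    show PySem.List.pyGet? ['A','C','G','T'] (0:Int) = some 'A' from by decide,
    show PySem.List.pyGet? ['A','C','G','T'] (1:Int) = some 'C' from by decide,
    show PySem.List.pyGet? ['A','C','G','T'] (2:Int) = some 'G' from by decide,
    show PySem.List.pyGet? ['A','C','G','T'] (3:Int) = some 'T' from by decide,
    show PySem.Int.toChars (0:Int) = ['0'] from by decide,
    show PySem.Int.toChars (1:Int) = ['1'] from by decide,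
    show PySem.Int.toChars (2:Int) = ['2'] from by decide,
    show PySem.Int.toChars (3:Int) = ['3'] from by decide,
    Option.some.injEq, pvG]
  split_ifs <;> simp_all [pvDC, eq_comm]

theorem pvNumStr (l : List Char) (ns : List Char) :
    l.foldl (fun ns i =>
      (PySem.List.pyRange 0 (PySem.List.len ['A','C','G','T']) 1).foldl (fun ns2 j =>
        if PySem.List.pyGet? ['A','C','G','T'] j = some i then ns2 ++ PySem.Int.toChars j else ns2) ns) ns
    = ns ++ (l.filterMap pvG).map pvDC := by
  induction l generalizing ns with
  | nil => simp
  | cons c l ih =>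
      simp only [List.foldl_cons, List.filterMap_cons]
      rw [pvInner_fold, ih]
      cases pvG c <;> simp [List.append_assoc]

theorem pvDigits_mem {l : List Char} {x : Int} (hx : x ∈ l.filterMap pvG) :
    x = 0 ∨ x = 1 ∨ x = 2 ∨ x = 3 := by
  rcases List.mem_filterMap.mp hx with ⟨c, _, hc⟩
  unfold pvG at hc
  split_ifs at hc <;> simp_all

theorem pvLen_eq_countP (l : List Char) :
    (l.filterMap pvG).length = l.countP (fun c => c == 'A' || c == 'C' || c == 'G' || c == 'T') := by
  rw [List.length_filterMap_eq_countP]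
  congr 1
  funext c
  unfold pvG
  split_ifs <;> simp_all

theorem pvOfChars_pvDC {d : Int} (hd : d = 0 ∨ d = 1 ∨ d = 2 ∨ d = 3) :
    PySem.Int.ofChars? [pvDC d] = some d := by
  rcases hd with h | h | h | h <;> subst h <;> decide

-- ---- B-side: the four replace passes on the filtered list give the same digit string ----

/-- single-character `str.replace` is a pointwise map (proved against the prelude's `go`) -/
theorem pvGo_single (a b : Char) : ∀ (s acc : List Char),
    PySem.Chars.replace.go [a] [b] s.length s acc
    = acc.reverse ++ s.map (fun c => if c = a then b else c) := by
  intro s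
  induction s with
  | nil => intro acc; unfold PySem.Chars.replace.go; simp
  | cons c t ih =>
      intro acc
      unfold PySem.Chars.replace.go
      simp only [List.length_cons, List.isPrefixOf, List.map_cons]
      by_cases hca : a = c
      · subst hca
        simp [ih]
      · have hne : (a == c) = false := by simp [hca]
        simp [hne, ih, show ¬ c = a from fun h => hca h.symm]

theorem pvReplace_single (a b : Char) (s : List Char) :
    PySem.Chars.replace s [a] [b] = s.map (fun c => if c = a then b else c) := by
  unfold PySem.Chars.replace
  rw [if_neg (by simp)]
  exact pvGo_single a b s []

/-- `c in 'ACGT'` as a plain membership test -/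
theorem pvIsIn_eq (c : Char) :
    PySem.Chars.isIn [c] ['A','C','G','T'] = (c == 'A' || c == 'C' || c == 'G' || c == 'T') := by
  by_cases h : c = 'A' ∨ c = 'C' ∨ c = 'G' ∨ c = 'T'
  · rcases h with h | h | h | h <;> subst h <;> decide
  · push_neg at h
    obtain ⟨h1, h2, h3, h4⟩ := h
    have : ¬ ([c] <:+: (['A','C','G','T'] : List Char)) := by
      intro hi
      have := hi.subset (List.mem_singleton_self c)
      simp only [List.mem_cons, List.not_mem_nil, or_false] at this
      tauto
    rw [(PySem.Chars.isIn_eq_false_iff _ _).mpr this]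
    simp [h1, h2, h3, h4]

/-- the filtered-then-replaced list IS A's digit string -/
theorem pvKept2 (l : List Char) :
    ((((l.filter (fun c => c == 'A' || c == 'C' || c == 'G' || c == 'T')).map
        (fun c => if c = 'A' then '0' else c)).map
        (fun c => if c = 'C' then '1' else c)).map
        (fun c => if c = 'G' then '2' else c)).map
        (fun c => if c = 'T' then '3' else c)
    = (l.filterMap pvG).map pvDC := by
  induction l with
  | nil => simp
  | cons c t ih =>
      simp only [List.filter_cons, List.filterMap_cons]
      by_cases h : c = 'A' ∨ c = 'C' ∨ c = 'G' ∨ c = 'T'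
      · rcases h with h | h | h | h <;> subst h <;>
          simpa [pvG, pvDC, List.map_cons] using ih
      · push_neg at h
        obtain ⟨h1, h2, h3, h4⟩ := h
        have hb : (c == 'A' || c == 'C' || c == 'G' || c == 'T') = false := by
          simp [h1, h2, h3, h4]
        have hg : pvG c = none := by unfold pvG; simp [h1, h2, h3, h4]
        rw [hb, hg]
        simpa using ih

-- ---- B-side: evaluating the 7-digit numeral ----

theorem pvVal_zero (q : List Char) : sevenmertorow_val q 0 = 0 := by
  rw [sevenmertorow_val]; simp

theorem pvVal_succ (q : List Char) (k : Int) (hk : 0 < k) :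
    sevenmertorow_val q k
    = sevenmertorow_val q (k - 1) * 4 +
        (PySem.Int.ofChars? (PySem.List.pyGet? q (k - 1)).toList).getD 0 := by
  rw [sevenmertorow_val, if_neg (by omega), if_neg (by omega)]

theorem pvVal7 (d0 d1 d2 d3 d4 d5 d6 : Int) (r : List Char)
    (h0 : d0 = 0 ∨ d0 = 1 ∨ d0 = 2 ∨ d0 = 3) (h1 : d1 = 0 ∨ d1 = 1 ∨ d1 = 2 ∨ d1 = 3)
    (h2 : d2 = 0 ∨ d2 = 1 ∨ d2 = 2 ∨ d2 = 3) (h3 : d3 = 0 ∨ d3 = 1 ∨ d3 = 2 ∨ d3 = 3)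
    (h4 : d4 = 0 ∨ d4 = 1 ∨ d4 = 2 ∨ d4 = 3) (h5 : d5 = 0 ∨ d5 = 1 ∨ d5 = 2 ∨ d5 = 3)
    (h6 : d6 = 0 ∨ d6 = 1 ∨ d6 = 2 ∨ d6 = 3) :
    sevenmertorow_val
      (pvDC d0 :: pvDC d1 :: pvDC d2 :: pvDC d3 :: pvDC d4 :: pvDC d5 :: pvDC d6 :: r) 7
    = d0 * 4 ^ 6 + d1 * 4 ^ 5 + d2 * 4 ^ 4 + d3 * 4 ^ 3 + d4 * 4 ^ 2 + d5 * 4 + d6 := by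
  have g : ∀ (i : Int) (n : Nat), i = (n : Int) → ∀ d : Int,
      (d = 0 ∨ d = 1 ∨ d = 2 ∨ d = 3) →
      (pvDC d0 :: pvDC d1 :: pvDC d2 :: pvDC d3 :: pvDC d4 :: pvDC d5 :: pvDC d6 :: r)[n]?
        = some (pvDC d) →
      (PySem.Int.ofChars?
        ((PySem.List.pyGet?
          (pvDC d0 :: pvDC d1 :: pvDC d2 :: pvDC d3 :: pvDC d4 :: pvDC d5 :: pvDC d6 :: r)
          i).toList)).getD 0 = d := by
    intro i n hi d hd hn
    subst hi
    rw [PySem.List.pyGet?_natCast, hn]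
    simp [pvOfChars_pvDC hd]
  rw [pvVal_succ _ 7 (by norm_num), show (7:Int) - 1 = 6 from by norm_num,
      pvVal_succ _ 6 (by norm_num), show (6:Int) - 1 = 5 from by norm_num,
      pvVal_succ _ 5 (by norm_num), show (5:Int) - 1 = 4 from by norm_num,
      pvVal_succ _ 4 (by norm_num), show (4:Int) - 1 = 3 from by norm_num,
      pvVal_succ _ 3 (by norm_num), show (3:Int) - 1 = 2 from by norm_num,
      pvVal_succ _ 2 (by norm_num), show (2:Int) - 1 = 1 from by norm_num,
      pvVal_succ _ 1 (by norm_num), show (1:Int) - 1 = 0 from by norm_num,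
      pvVal_zero]
  rw [g 0 0 (by norm_num) d0 h0 (by simp), g 1 1 (by norm_num) d1 h1 (by simp),
      g 2 2 (by norm_num) d2 h2 (by simp), g 3 3 (by norm_num) d3 h3 (by simp),
      g 4 4 (by norm_num) d4 h4 (by simp), g 5 5 (by norm_num) d5 h5 (by simp),
      g 6 6 (by norm_num) d6 h6 (by simp)]
  ring

-- ---- A-side final polynomial on an explicit 7-digit prefix ----

theorem pvAFinal (d0 d1 d2 d3 d4 d5 d6 : Int) (t : List Int)
    (h0 : d0 = 0 ∨ d0 = 1 ∨ d0 = 2 ∨ d0 = 3) (h1 : d1 = 0 ∨ d1 = 1 ∨ d1 = 2 ∨ d1 = 3)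
    (h2 : d2 = 0 ∨ d2 = 1 ∨ d2 = 2 ∨ d2 = 3) (h3 : d3 = 0 ∨ d3 = 1 ∨ d3 = 2 ∨ d3 = 3)
    (h4 : d4 = 0 ∨ d4 = 1 ∨ d4 = 2 ∨ d4 = 3) (h5 : d5 = 0 ∨ d5 = 1 ∨ d5 = 2 ∨ d5 = 3)
    (h6 : d6 = 0 ∨ d6 = 1 ∨ d6 = 2 ∨ d6 = 3) :
    (PySem.Int.ofChars? [PySem.List.pyGetD ((d0::d1::d2::d3::d4::d5::d6::t).map pvDC) 0 ' ']).getD 0 * 4 ^ 6 +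
    (PySem.Int.ofChars? [PySem.List.pyGetD ((d0::d1::d2::d3::d4::d5::d6::t).map pvDC) 1 ' ']).getD 0 * 4 ^ 5 +
    (PySem.Int.ofChars? [PySem.List.pyGetD ((d0::d1::d2::d3::d4::d5::d6::t).map pvDC) 2 ' ']).getD 0 * 4 ^ 4 +
    (PySem.Int.ofChars? [PySem.List.pyGetD ((d0::d1::d2::d3::d4::d5::d6::t).map pvDC) 3 ' ']).getD 0 * 4 ^ 3 +
    (PySem.Int.ofChars? [PySem.List.pyGetD ((d0::d1::d2::d3::d4::d5::d6::t).map pvDC) 4 ' ']).getD 0 * 4 ^ 2 +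
    (PySem.Int.ofChars? [PySem.List.pyGetD ((d0::d1::d2::d3::d4::d5::d6::t).map pvDC) 5 ' ']).getD 0 * 4 +
    (PySem.Int.ofChars? [PySem.List.pyGetD ((d0::d1::d2::d3::d4::d5::d6::t).map pvDC) 6 ' ']).getD 0
    = d0 * 4 ^ 6 + d1 * 4 ^ 5 + d2 * 4 ^ 4 + d3 * 4 ^ 3 + d4 * 4 ^ 2 + d5 * 4 + d6 := by
  simp only [List.map, PySem.List.pyGetD_ofNat']
  simp only [List.getD, List.getElem?_cons_zero, List.getElem?_cons_succ, Option.getD_some]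
  rw [pvOfChars_pvDC h0, pvOfChars_pvDC h1, pvOfChars_pvDC h2, pvOfChars_pvDC h3,
      pvOfChars_pvDC h4, pvOfChars_pvDC h5, pvOfChars_pvDC h6]
  simp only [Option.getD_some]

-- ===== VERDICT (by name: the statement is the Claim_ definition above) =====
theorem sevenmertorow_spec : Claim_equal_sevenmertorow := by
  intro s _ hpre
  unfold Spec_sevenmertorow sevenmertorow sevenmertorow_alt
  simp only []
  rw [pvNumStr]
  -- B's filter has the same predicate as Pre_'s count
  have hf : s.toList.filter (fun c => PySem.Chars.isIn [c] ['A','C','G','T'])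
      = s.toList.filter (fun c => c == 'A' || c == 'C' || c == 'G' || c == 'T') := by
    apply List.filter_congr; intro c _; exact pvIsIn_eq c
  -- unfold the four replace passes
  have hzip : (List.zip ['A','C','G','T'] ['0','1','2','3'] : List (Char × Char))
      = [('A','0'), ('C','1'), ('G','2'), ('T','3')] := by decide
  rw [hzip]
  simp only [List.foldl_cons, List.foldl_nil, pvReplace_single]
  rw [hf, pvKept2]
  -- both sides now live on the digit list; split off its first 7 entries
  have hlen : 7 ≤ (s.toList.filterMap pvG).length := by
    rw [pvLen_eq_countP]; exact hpre
  rcases hds : s.toList.filterMap pvG with _ | ⟨d0, t0⟩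
  · rw [hds] at hlen; simp at hlen
  rcases t0 with _ | ⟨d1, t1⟩
  · rw [hds] at hlen; simp at hlen
  rcases t1 with _ | ⟨d2, t2⟩
  · rw [hds] at hlen; simp at hlen
  rcases t2 with _ | ⟨d3, t3⟩
  · rw [hds] at hlen; simp at hlen
  rcases t3 with _ | ⟨d4, t4⟩
  · rw [hds] at hlen; simp at hlen
  rcases t4 with _ | ⟨d5, t5⟩
  · rw [hds] at hlen; simp at hlen
  rcases t5 with _ | ⟨d6, t6⟩
  · rw [hds] at hlen; simp at hlen
  simp only [List.nil_append, List.map_cons]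
  have m0 := pvDigits_mem (hds ▸ (List.mem_cons_self : d0 ∈ _))
  have m1 := pvDigits_mem (hds ▸ List.mem_cons_of_mem _ (List.mem_cons_self))
  have m2 := pvDigits_mem (hds ▸ List.mem_cons_of_mem _ (List.mem_cons_of_mem _ List.mem_cons_self))
  have m3 := pvDigits_mem (hds ▸ List.mem_cons_of_mem _ (List.mem_cons_of_mem _ (List.mem_cons_of_mem _ List.mem_cons_self)))
  have m4 := pvDigits_mem (hds ▸ List.mem_cons_of_mem _ (List.mem_cons_of_mem _ (List.mem_cons_of_mem _ (List.mem_cons_of_mem _ List.mem_cons_self))))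
  have m5 := pvDigits_mem (hds ▸ List.mem_cons_of_mem _ (List.mem_cons_of_mem _ (List.mem_cons_of_mem _ (List.mem_cons_of_mem _ (List.mem_cons_of_mem _ List.mem_cons_self)))))
  have m6 := pvDigits_mem (hds ▸ List.mem_cons_of_mem _ (List.mem_cons_of_mem _ (List.mem_cons_of_mem _ (List.mem_cons_of_mem _ (List.mem_cons_of_mem _ (List.mem_cons_of_mem _ List.mem_cons_self))))))
  rw [pvVal7 d0 d1 d2 d3 d4 d5 d6 (t6.map pvDC) m0 m1 m2 m3 m4 m5 m6]
  exact pvAFinal d0 d1 d2 d3 d4 d5 d6 t6 m0 m1 m2 m3 m4 m5 m6
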